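-- pv_equiv track=rewrite | github.com/projeto-exercicios/Exerc-cios-Python-de-correc-o-autom-tica | 03_Implementacao/differenceFinder.py | idxFinder
-- ===== SOURCE A (Python) =====
-- def idxFinder(arr):
--     idxBegin = 0
--     idxCode = []
--     isCode = False
--     idxEnd = 0
--     endFound = False
--
--     for indice in range(len(arr)):
--         if r'\begin{document}' in arr[indice]:
--             idxBegin = indice
--         if r'\lstinputlisting{' in arr[indice]:
--             idxCode.append(indice)
--             isCode = True
--         if not endFound:
--             if r'\questiom' in arr[indice]:
--                 idxEnd = indice
--                 endFound = True
--             if r'\end{document}' in arr[indice]: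
--                 idxEnd = indice
--                 endFound = True
--     return idxBegin, idxCode, idxEnd, isCode
-- ===== SOURCE B (Python) =====
-- def idxFinder(arr):
--     idxCode = [i for i, l in enumerate(arr) if r'\lstinputlisting{' in l]
--     isCode = bool(idxCode)
--     begins = [i for i, l in enumerate(arr) if r'\begin{document}' in l]
--     idxBegin = begins[-1] if begins else 0
--     idxEnd = next((i for i, l in enumerate(arr)
--                    if r'\questiom' in l or r'\end{document}' in l), 0)
--     return idxBegin, idxCode, idxEnd, isCode
-- ===== Notes on version B (the rewrite author's own statement) =====
-- stated objective: idiomatic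
-- what changed: Replaced A's single combined loop carrying five pieces of mutable state with four independent scans: a comprehension for the code-listing indices, bool() of it, a last-match comprehension for \begin{document}, and next() over a generator for the first end marker.
import Mathlib
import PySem

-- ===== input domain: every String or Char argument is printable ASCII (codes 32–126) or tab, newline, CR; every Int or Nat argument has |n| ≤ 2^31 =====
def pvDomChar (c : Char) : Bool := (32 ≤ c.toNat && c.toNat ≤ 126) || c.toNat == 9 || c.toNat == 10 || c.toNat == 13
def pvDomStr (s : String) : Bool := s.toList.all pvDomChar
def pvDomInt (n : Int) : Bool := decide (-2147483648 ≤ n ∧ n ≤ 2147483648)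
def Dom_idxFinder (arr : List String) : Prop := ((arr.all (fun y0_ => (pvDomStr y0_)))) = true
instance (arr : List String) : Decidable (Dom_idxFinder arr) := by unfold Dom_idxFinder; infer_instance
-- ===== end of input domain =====

-- B replaces A's single five-state loop by four independent scans (idiomatic decomposition; same cost).

-- ===== PORT A =====
-- loop body of A: state = (idxBegin, idxCode, isCode, idxEnd, endFound), indice from range(len(arr))
def pvAStep (arr : List String) (st : Int × List Int × Bool × Int × Bool) (indice : Int) :
    Int × List Int × Bool × Int × Bool :=
  let (idxBegin, idxCode, isCode, idxEnd, endFound) := st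
  let line := PySem.List.pyGetD arr indice ""
  let idxBegin := if PySem.Str.isIn "\\begin{document}" line then indice else idxBegin
  let (idxCode, isCode) :=
    if PySem.Str.isIn "\\lstinputlisting{" line then (idxCode ++ [indice], true) else (idxCode, isCode)
  let (idxEnd, endFound) :=
    if !endFound then
      let (idxEnd, endFound) :=
        if PySem.Str.isIn "\\questiom" line then (indice, true) else (idxEnd, endFound)
      if PySem.Str.isIn "\\end{document}" line then (indice, true) else (idxEnd, endFound)
    else (idxEnd, endFound)
  (idxBegin, idxCode, isCode, idxEnd, endFound)

def idxFinder (arr : List String) : Int × List Int × Int × Bool :=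
  let st := (PySem.List.pyRange 0 (arr.length : Int) 1).foldl (pvAStep arr) (0, [], false, 0, false)
  (st.1, st.2.1, st.2.2.2.1, st.2.2.1)

-- ===== PORT B =====
def idxFinder_alt (arr : List String) : Int × List Int × Int × Bool :=
  let idxCode := ((PySem.List.enumerate arr 0).filter
      (fun p => PySem.Str.isIn "\\lstinputlisting{" p.2)).map (·.1)
  let isCode := !idxCode.isEmpty
  let begins := ((PySem.List.enumerate arr 0).filter
      (fun p => PySem.Str.isIn "\\begin{document}" p.2)).map (·.1)
  let idxBegin := begins.getLastD 0
  let idxEnd := (((PySem.List.enumerate arr 0).find?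
      (fun p => PySem.Str.isIn "\\questiom" p.2 || PySem.Str.isIn "\\end{document}" p.2)).map (·.1)).getD 0
  (idxBegin, idxCode, idxEnd, isCode)

-- ===== PRECONDITION & SPEC =====
def Spec_idxFinder (arr : List String) (out : Int × List Int × Int × Bool) : Prop := out = idxFinder_alt arr
instance (arr : List String) (out : Int × List Int × Int × Bool) : Decidable (Spec_idxFinder arr out) := by unfold Spec_idxFinder; infer_instance

-- ===== CLAIM (what is proved, stated in full; the proofs are below) =====
def Claim_equal_idxFinder : Prop := ∀ (arr : List String), Dom_idxFinder arr → Spec_idxFinder arr (idxFinder arr)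

-- ===== LEMMAS AND PROOFS =====

-- A's loop body on an (index, line) pair, with the four substring tests abstracted
def pvGStep (Pb Pc Pq Pe : String → Bool) (st : Int × List Int × Bool × Int × Bool)
    (p : Int × String) : Int × List Int × Bool × Int × Bool :=
  let (idxBegin, idxCode, isCode, idxEnd, endFound) := st
  let idxBegin := if Pb p.2 then p.1 else idxBegin
  let (idxCode, isCode) := if Pc p.2 then (idxCode ++ [p.1], true) else (idxCode, isCode)
  let (idxEnd, endFound) :=
    if !endFound then
      let (idxEnd, endFound) := if Pq p.2 then (p.1, true) else (idxEnd, endFound)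
      if Pe p.2 then (p.1, true) else (idxEnd, endFound)
    else (idxEnd, endFound)
  (idxBegin, idxCode, isCode, idxEnd, endFound)

lemma pvGFold (Pb Pc Pq Pe : String → Bool) (ps : List (Int × String)) (b0 : Int)
    (c0 : List Int) (ic0 : Bool) (e0 : Int) (ef0 : Bool) :
    ps.foldl (pvGStep Pb Pc Pq Pe) (b0, c0, ic0, e0, ef0) =
      ( ((ps.filter (fun p => Pb p.2)).map (·.1)).getLastD b0,
        c0 ++ (ps.filter (fun p => Pc p.2)).map (·.1),
        (ic0 || !(ps.filter (fun p => Pc p.2)).isEmpty),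
        (if ef0 then e0 else
          (((ps.find? (fun p => Pq p.2 || Pe p.2)).map (·.1)).getD e0)),
        (ef0 || (ps.find? (fun p => Pq p.2 || Pe p.2)).isSome) ) := by
  induction ps generalizing b0 c0 ic0 e0 ef0 with
  | nil => simp
  | cons p ps ih =>
    simp only [List.foldl_cons, List.filter_cons, List.find?_cons]
    cases hb : Pb p.2 <;> cases hc : Pc p.2 <;> cases hq : Pq p.2 <;> cases he : Pe p.2 <;>
      cases ef0 <;>
      simp only [pvGStep, hb, hc, hq, he, ih, List.getLastD_cons, List.map_cons,
        List.isEmpty_cons, Bool.not_false, Bool.not_true, Bool.false_or, Bool.true_or,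
        Bool.or_false, Bool.or_true, Option.map_some, Option.getD_some, Option.isSome_some,
        reduceIte, List.cons_append, List.nil_append, List.append_assoc,
        Prod.mk.injEq, and_true, true_and] <;>
      simp

lemma pvAStep_eq_gstep (arr : List String) :
    pvAStep arr = fun st j => pvGStep
      (fun l => PySem.Str.isIn "\\begin{document}" l)
      (fun l => PySem.Str.isIn "\\lstinputlisting{" l)
      (fun l => PySem.Str.isIn "\\questiom" l)
      (fun l => PySem.Str.isIn "\\end{document}" l)
      st (j, PySem.List.pyGetD arr j "") := rfl

-- ===== VERDICT (by name: the statement is the Claim_ definition above) =====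
theorem idxFinder_spec : Claim_equal_idxFinder := by
  intro arr _
  show idxFinder arr = idxFinder_alt arr
  unfold idxFinder idxFinder_alt
  have hen : PySem.List.enumerate arr 0 =
      (PySem.List.pyRange 0 (arr.length : Int) 1).map
        (fun j => (j, PySem.List.pyGetD arr j "")) := by
    simpa [PySem.List.len] using PySem.List.enumerate_eq_map_pyRange (xs := arr) (d := "")
  have hfold : (PySem.List.pyRange 0 (arr.length : Int) 1).foldl (pvAStep arr)
      (0, [], false, 0, false) =
      (PySem.List.enumerate arr 0).foldl (pvGStep
        (fun l => PySem.Str.isIn "\\begin{document}" l)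
        (fun l => PySem.Str.isIn "\\lstinputlisting{" l)
        (fun l => PySem.Str.isIn "\\questiom" l)
        (fun l => PySem.Str.isIn "\\end{document}" l)) (0, [], false, 0, false) := by
    rw [hen, List.foldl_map, pvAStep_eq_gstep]
  rw [hfold, pvGFold]
  simp
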